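-- pv_equiv track=rewrite | github.com/jaehyeonkim2358/W02_teamB7 | 16564/16564_kjh.py | solution
-- ===== SOURCE A (Python) =====
-- def solution(target, key):
--     s = min(target)
--     e = max(target) + key
--     while s < e:
--         m = (s+e)//2 + 1
--         if get_dest_level(target, m, key):
--             s = m
--         else:
--             e = m - 1
--     return e
--
-- def get_dest_level(target, dest_lev, key):
--     for t in target:
--         if t >= dest_lev:
--             break
--         else:
--             key -= (dest_lev-t)
--         if key < 0:
--             return False
--     return True
-- ===== SOURCE B (Python) =====
-- def solution(target, key):
--     # Same answer via prefix arrays: running-max + prefix sums built once; each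
--     # feasibility query is answered by an inner binary search instead of a rescan.
--     n = len(target)
--     runmax = []
--     for t in target:
--         runmax.append(t if not runmax or t > runmax[-1] else runmax[-1])
--     prefsum = [0]
--     for t in target:
--         prefsum.append(prefsum[-1] + t)
--
--     def feasible(m):
--         # leftmost index whose running max is >= m == break index of A's scan
--         lo, hi = 0, n
--         while lo < hi:
--             mid = (lo + hi) // 2
--             if runmax[mid] >= m:
--                 hi = mid
--             else:
--                 lo = mid + 1
--         return lo == 0 or m * lo - prefsum[lo] <= key
--
--     s = min(target)
--     e = max(target) + key
--     while s < e:
--         m = (s + e) // 2 + 1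
--         if feasible(m):
--             s = m
--         else:
--             e = m - 1
--     return e
-- ===== Notes on version B (the rewrite author's own statement) =====
-- stated objective: alternative
-- what changed: B precomputes running-max and prefix-sum arrays once and answers each feasibility query of the level binary search with an inner binary search (cost = m*i - prefsum[i] at the leftmost index i whose running max reaches m) instead of A's per-query rescan of target.
import Mathlib
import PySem

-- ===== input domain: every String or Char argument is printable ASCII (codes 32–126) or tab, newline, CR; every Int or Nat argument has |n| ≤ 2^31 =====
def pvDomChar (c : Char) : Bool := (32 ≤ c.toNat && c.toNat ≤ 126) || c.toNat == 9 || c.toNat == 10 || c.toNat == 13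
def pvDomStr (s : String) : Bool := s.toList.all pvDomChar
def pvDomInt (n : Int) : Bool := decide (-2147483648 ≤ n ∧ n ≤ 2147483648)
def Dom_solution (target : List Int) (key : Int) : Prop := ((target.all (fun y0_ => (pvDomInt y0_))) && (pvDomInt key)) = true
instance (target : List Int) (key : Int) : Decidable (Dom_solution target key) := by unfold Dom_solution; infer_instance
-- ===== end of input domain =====

-- B answers each feasibility query of the level search by a binary search over running-max /
-- prefix-sum arrays built once, instead of A's rescan of target (objective: alternative).
-- Equivalence of the return value on every nonempty target is proved below.

-- ===== PORT A =====
-- the for-loop of get_dest_level, carrying the mutable 'key'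
def goA (dest_lev : Int) : List Int → Int → Bool
  | [], _ => true
  | t :: ts, k =>
    if t ≥ dest_lev then true
    else
      let k' := k - (dest_lev - t)
      if k' < 0 then false else goA dest_lev ts k'

def get_dest_level (target : List Int) (dest_lev : Int) (key : Int) : Bool :=
  goA dest_lev target key

-- the while-loop of A's solution
def loopA (target : List Int) (key : Int) (s e : Int) : Int :=
  if s < e then
    let m := PySem.Int.floordiv (s + e) 2 + 1
    if get_dest_level target m key then loopA target key m e
    else loopA target key s (m - 1)
  else e
termination_by (e - s).toNat
decreasing_by
  all_goals
    rw [PySem.Int.floordiv_eq_ediv_of_pos (by omega : (0:Int) < 2)] at *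
    omega

def solution (target : List Int) (key : Int) : Int :=
  let s := (PySem.List.min? target (fun x => x)).getD 0
  let e := (PySem.List.max? target (fun x => x)).getD 0 + key
  loopA target key s e

-- ===== PORT B =====
-- runmax.append(t if not runmax or t > runmax[-1] else runmax[-1])
def rmStep (rm : List Int) (t : Int) : List Int :=
  rm ++ [match rm.getLast? with | none => t | some c => if t > c then t else c]

def buildRunmax (target : List Int) : List Int := target.foldl rmStep []

-- prefsum.append(prefsum[-1] + t)
def psStep (ps : List Int) (t : Int) : List Int := ps ++ [(ps.getLast?).getD 0 + t]

def buildPrefsum (target : List Int) : List Int := target.foldl psStep [0]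

-- inner while-loop of feasible: leftmost index with runmax[mid] >= m
def bsLoop (runmax : List Int) (m : Int) (lo hi : Int) : Int :=
  if lo < hi then
    let mid := PySem.Int.floordiv (lo + hi) 2
    if m ≤ (PySem.List.pyGet? runmax mid).getD 0 then bsLoop runmax m lo mid
    else bsLoop runmax m (mid + 1) hi
  else lo
termination_by (hi - lo).toNat
decreasing_by
  all_goals
    rw [PySem.Int.floordiv_eq_ediv_of_pos (by omega : (0:Int) < 2)] at *
    omega

def feasibleB (runmax prefsum : List Int) (n key m : Int) : Bool :=
  let i := bsLoop runmax m 0 n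
  i == 0 || decide (m * i - (PySem.List.pyGet? prefsum i).getD 0 ≤ key)

-- outer while-loop of B's solution
def loopB (runmax prefsum : List Int) (n key s e : Int) : Int :=
  if s < e then
    let m := PySem.Int.floordiv (s + e) 2 + 1
    if feasibleB runmax prefsum n key m then loopB runmax prefsum n key m e
    else loopB runmax prefsum n key s (m - 1)
  else e
termination_by (e - s).toNat
decreasing_by
  all_goals
    rw [PySem.Int.floordiv_eq_ediv_of_pos (by omega : (0:Int) < 2)] at *
    omega

def solution_alt (target : List Int) (key : Int) : Int :=
  let n : Int := target.length
  let runmax := buildRunmax target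
  let prefsum := buildPrefsum target
  let s := (PySem.List.min? target (fun x => x)).getD 0
  let e := (PySem.List.max? target (fun x => x)).getD 0 + key
  loopB runmax prefsum n key s e

-- ===== PRECONDITION & SPEC =====
-- Pre_ excludes only the empty list, on which Python's min(target) raises ValueError.
def Pre_solution (target : List Int) (_key : Int) : Prop := target ≠ []
instance (target : List Int) (key : Int) : Decidable (Pre_solution target key) := by
  unfold Pre_solution; infer_instance

def pvWitness_solution : List Int × Int := ([1, 3, 2], 4)

def Spec_solution (target : List Int) (key : Int) (out : Int) : Prop := out = solution_alt target key
instance (target : List Int) (key : Int) (out : Int) : Decidable (Spec_solution target key out) := by unfold Spec_solution; infer_instance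

-- ===== CLAIM (what is proved, stated in full; the proofs are below) =====
def Claim_equal_solution : Prop := ∀ (target : List Int) (key : Int), Dom_solution target key → Pre_solution target key → Spec_solution target key (solution target key)

-- ===== LEMMAS AND PROOFS =====

-- spec shapes of the two arrays
def scanMax (c : Int) : List Int → List Int
  | [] => []
  | t :: ts => let c' := if t > c then t else c; c' :: scanMax c' ts

def runmaxSpec : List Int → List Int
  | [] => []
  | t :: ts => t :: scanMax t ts

def psSpec (c : Int) : List Int → List Int
  | [] => []
  | t :: ts => (c + t) :: psSpec (c + t) ts

-- the prefix of target that A's scan pays for at level m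
def TW (target : List Int) (m : Int) : List Int :=
  target.takeWhile (fun t => decide (t < m))

lemma buildRunmax_go (ts : List Int) : ∀ (rm : List Int) (c : Int),
    rm.getLast? = some c → ts.foldl rmStep rm = rm ++ scanMax c ts := by
  induction ts with
  | nil => intro rm c _; simp [scanMax]
  | cons t ts ih =>
    intro rm c hl
    have hstep : rmStep rm t = rm ++ [if t > c then t else c] := by
      simp [rmStep, hl]
    simp only [List.foldl_cons, hstep]
    rw [ih (rm ++ [if t > c then t else c]) (if t > c then t else c) (by simp)]
    simp [scanMax]

lemma buildRunmax_eq (target : List Int) : buildRunmax target = runmaxSpec target := by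
  cases target with
  | nil => rfl
  | cons t ts =>
    have h0 : rmStep [] t = [t] := by simp [rmStep]
    simp only [buildRunmax, List.foldl_cons, h0]
    rw [buildRunmax_go ts [t] t (by simp)]
    simp [runmaxSpec]

lemma buildPrefsum_go (ts : List Int) : ∀ (ps : List Int) (c : Int),
    ps.getLast? = some c → ts.foldl psStep ps = ps ++ psSpec c ts := by
  induction ts with
  | nil => intro ps c _; simp [psSpec]
  | cons t ts ih =>
    intro ps c hl
    have hstep : psStep ps t = ps ++ [c + t] := by simp [psStep, hl]
    simp only [List.foldl_cons, hstep]
    rw [ih (ps ++ [c + t]) (c + t) (by simp)]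
    simp [psSpec]

lemma buildPrefsum_eq (target : List Int) : buildPrefsum target = 0 :: psSpec 0 target := by
  have := buildPrefsum_go target [0] 0 (by simp)
  simpa [buildPrefsum] using this

lemma scanMax_getD (ts : List Int) : ∀ (c : Int) (j : Nat), j < ts.length →
    (scanMax c ts).getD j 0 = (ts.take (j + 1)).foldl max c := by
  induction ts with
  | nil => intro c j h; simp at h
  | cons t ts ih =>
    intro c j h
    have hmax : (if t > c then t else c) = max c t := by omega
    cases j with
    | zero => simp [scanMax, hmax]
    | succ j =>
      simp only [scanMax, List.getD_cons_succ, List.take_succ_cons, List.foldl_cons]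
      rw [ih _ j (by simpa using h), hmax]

lemma le_foldl_max_iff (l : List Int) : ∀ (c m : Int),
    m ≤ l.foldl max c ↔ m ≤ c ∨ ∃ x ∈ l, m ≤ x := by
  induction l with
  | nil => intro c m; simp
  | cons t ts ih =>
    intro c m
    simp only [List.foldl_cons, List.mem_cons, ih]
    constructor
    · rintro (h | ⟨x, hx, hmx⟩)
      · rcases le_max_iff.mp h with h | h
        · exact Or.inl h
        · exact Or.inr ⟨t, Or.inl rfl, h⟩
      · exact Or.inr ⟨x, Or.inr hx, hmx⟩
    · rintro (h | ⟨x, hx | hx, hmx⟩)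
      · exact Or.inl (le_max_iff.mpr (Or.inl h))
      · subst hx; exact Or.inl (le_max_iff.mpr (Or.inr hmx))
      · exact Or.inr ⟨x, hx, hmx⟩

lemma exists_in_take_iff (ts : List Int) (m : Int) : ∀ (j : Nat), j ≤ ts.length →
    ((∃ x ∈ ts.take j, m ≤ x) ↔ (TW ts m).length < j) := by
  induction ts with
  | nil =>
    intro j hj
    have hj0 : j = 0 := by simpa using hj
    subst hj0; simp [TW]
  | cons t ts ih =>
    intro j hj
    cases j with
    | zero => simp
    | succ j =>
      by_cases ht : t < m
      · have htw : TW (t :: ts) m = t :: TW ts m := by simp [TW, ht]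
        rw [htw]
        simp only [List.take_succ_cons, List.mem_cons, List.length_cons]
        rw [show ((TW ts m).length + 1 < j + 1) ↔ ((TW ts m).length < j) from by omega,
          ← ih j (by simpa using hj)]
        constructor
        · rintro ⟨x, hx | hx, hmx⟩
          · subst hx; exact absurd hmx (by omega)
          · exact ⟨x, hx, hmx⟩
        · rintro ⟨x, hx, hmx⟩; exact ⟨x, Or.inr hx, hmx⟩
      · have htw : TW (t :: ts) m = [] := by simp [TW, ht]
        rw [htw]
        simp only [List.take_succ_cons, List.mem_cons, List.length_nil]
        constructor
        · intro _; omega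
        · intro _; exact ⟨t, Or.inl rfl, by omega⟩

lemma runmax_ge_iff (target : List Int) (m : Int) (j : Nat) (hj : j < target.length) :
    (m ≤ (runmaxSpec target).getD j 0 ↔ (TW target m).length ≤ j) := by
  cases target with
  | nil => simp at hj
  | cons t ts =>
    cases j with
    | zero =>
      by_cases ht : t < m
      · have htw : TW (t :: ts) m = t :: TW ts m := by simp [TW, ht]
        rw [htw]
        simp only [runmaxSpec, List.getD_cons_zero, List.length_cons]
        constructor <;> intro h <;> omega
      · have htw : TW (t :: ts) m = [] := by simp [TW, ht]
        rw [htw]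
        simp only [runmaxSpec, List.getD_cons_zero, List.length_nil]
        constructor <;> intro h <;> omega
    | succ j =>
      simp only [runmaxSpec, List.getD_cons_succ]
      rw [scanMax_getD ts t j (by simpa using hj), le_foldl_max_iff]
      rw [exists_in_take_iff ts m (j + 1) (by simpa using hj)]
      by_cases ht : t < m
      · have htw : TW (t :: ts) m = t :: TW ts m := by simp [TW, ht]
        rw [htw]
        simp only [List.length_cons]
        constructor
        · rintro (h | h) <;> omega
        · intro h; right; omega
      · have htw : TW (t :: ts) m = [] := by simp [TW, ht]
        rw [htw]
        simp only [List.length_nil]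
        constructor
        · intro _; omega
        · intro _; left; omega

lemma psSpec_getD (ts : List Int) : ∀ (c : Int) (j : Nat), j < ts.length →
    (psSpec c ts).getD j 0 = c + (ts.take (j + 1)).sum := by
  induction ts with
  | nil => intro c j h; simp at h
  | cons t ts ih =>
    intro c j h
    cases j with
    | zero => simp [psSpec]
    | succ j =>
      simp only [psSpec, List.getD_cons_succ, List.take_succ_cons, List.sum_cons]
      rw [ih (c + t) j (by simpa using h)]
      ring

lemma prefsum_getD (target : List Int) (i : Nat) (hi : i ≤ target.length) :
    (0 :: psSpec 0 target).getD i 0 = (target.take i).sum := by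
  cases i with
  | zero => simp
  | succ i =>
    simp only [List.getD_cons_succ]
    rcases Nat.lt_or_ge i target.length with h | h
    · rw [psSpec_getD target 0 i h]; ring_nf
    · omega

lemma TW_length_le (target : List Int) (m : Int) : (TW target m).length ≤ target.length :=
  (List.takeWhile_sublist _).length_le

lemma TW_mem_lt (target : List Int) (m : Int) : ∀ x ∈ TW target m, x < m := by
  intro x hx
  have := List.mem_takeWhile_imp hx
  simpa using this

lemma cost_nonneg (m : Int) : ∀ (p : List Int), (∀ x ∈ p, x < m) →
    0 ≤ m * p.length - p.sum := by
  intro p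
  induction p with
  | nil => intro _; simp
  | cons t ts ih =>
    intro h
    have h1 : t < m := h t (List.mem_cons_self ..)
    have h2 := ih (fun x hx => h x (List.mem_cons_of_mem _ hx))
    simp only [List.length_cons, List.sum_cons]
    push_cast
    nlinarith

lemma goA_eq (m : Int) : ∀ (ts : List Int) (k : Int),
    goA m ts k = decide (TW ts m = [] ∨ m * (TW ts m).length - (TW ts m).sum ≤ k) := by
  intro ts
  induction ts with
  | nil => intro k; simp [goA, TW]
  | cons t ts ih =>
    intro k
    by_cases ht : t < m
    · have htw : TW (t :: ts) m = t :: TW ts m := by simp [TW, ht]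
      have hnotge : ¬ t ≥ m := by omega
      rw [htw]
      simp only [goA, if_neg hnotge]
      have hcost : m * ((t :: TW ts m).length : Int) - (t :: TW ts m).sum
          = (m - t) + (m * ((TW ts m).length : Int) - (TW ts m).sum) := by
        simp only [List.length_cons, List.sum_cons]; push_cast; ring
      have h0 := cost_nonneg m (TW ts m) (TW_mem_lt ts m)
      by_cases hk : k - (m - t) < 0
      · rw [if_pos hk]
        have hgt : ¬ (m * ((t :: TW ts m).length : Int) - (t :: TW ts m).sum ≤ k) := by
          rw [hcost]; linarith
        have hnor : ¬ (t :: TW ts m = [] ∨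
            m * ((t :: TW ts m).length : Int) - (t :: TW ts m).sum ≤ k) := by
          rintro (h | h)
          · exact List.cons_ne_nil _ _ h
          · exact hgt h
        exact (decide_eq_false hnor).symm
      · rw [if_neg hk]
        rw [ih (k - (m - t))]
        have heq : (TW ts m = [] ∨ m * ((TW ts m).length : Int) - (TW ts m).sum ≤ k - (m - t))
            ↔ (t :: TW ts m = [] ∨ m * ((t :: TW ts m).length : Int) - (t :: TW ts m).sum ≤ k) := by
        -- if the rest-prefix is empty its cost is 0, so both sides reduce to linear arithmetic
          rw [hcost]
          constructor
          · rintro (h | h)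
            · right
              have : (TW ts m).length = 0 := by rw [h]; rfl
              have hs : (TW ts m).sum = 0 := by rw [h]; rfl
              rw [this] at *
              omega
            · right; omega
          · rintro (h | h)
            · exact absurd h (List.cons_ne_nil _ _)
            · right; omega
        simp only [decide_eq_decide]
        exact heq
    · have htw : TW (t :: ts) m = [] := by simp [TW, ht]
      have hge : t ≥ m := by omega
      rw [htw]
      simp [goA, if_pos hge]

lemma bsLoop_eq (target : List Int) (m : Int) :
    ∀ (d : Nat) (lo hi : Int), (hi - lo).toNat ≤ d → 0 ≤ lo → hi ≤ (target.length : Int) →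
      lo ≤ ((TW target m).length : Int) → ((TW target m).length : Int) ≤ hi →
      bsLoop (runmaxSpec target) m lo hi = ((TW target m).length : Int) := by
  intro d
  induction d with
  | zero =>
    intro lo hi hd h0 hn hlo hhi
    rw [bsLoop]
    have hnlt : ¬ lo < hi := by omega
    rw [if_neg hnlt]
    omega
  | succ d ih =>
    intro lo hi hd h0 hn hlo hhi
    rw [bsLoop]
    by_cases hlt : lo < hi
    · have hmid : PySem.Int.floordiv (lo + hi) 2 = (lo + hi) / 2 :=
        PySem.Int.floordiv_eq_ediv_of_pos (by omega)
      simp only [if_pos hlt, hmid]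
      have hmidn : ((lo + hi) / 2).toNat < target.length := by omega
      have hget : (PySem.List.pyGet? (runmaxSpec target) ((lo + hi) / 2)).getD 0
          = (runmaxSpec target).getD ((lo + hi) / 2).toNat 0 := by
        rw [PySem.List.pyGet?_of_nonneg _ (by omega)]
        exact List.getD_eq_getElem?_getD.symm
      have hchar := runmax_ge_iff target m ((lo + hi) / 2).toNat hmidn
      by_cases hge : m ≤ (PySem.List.pyGet? (runmaxSpec target) ((lo + hi) / 2)).getD 0
      · rw [if_pos hge]
        rw [hget] at hge
        have hub : ((TW target m).length : Int) ≤ (lo + hi) / 2 := by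
          have := hchar.mp hge; omega
        exact ih lo _ (by omega) h0 (by omega) hlo hub
      · rw [if_neg hge]
        rw [hget] at hge
        have hlb : (lo + hi) / 2 < ((TW target m).length : Int) := by
          by_contra hc
          exact hge (hchar.mpr (by omega))
        exact ih _ hi (by omega) (by omega) hn (by omega) hhi
    · rw [if_neg hlt]; omega

lemma feasible_eq (target : List Int) (key m : Int) :
    feasibleB (runmaxSpec target) (0 :: psSpec 0 target) (target.length : Int) key m
      = get_dest_level target m key := by
  unfold feasibleB get_dest_level
  have hile : (TW target m).length ≤ target.length := TW_length_le target m
  have hbs : bsLoop (runmaxSpec target) m 0 (target.length : Int)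
      = ((TW target m).length : Int) :=
    bsLoop_eq target m target.length 0 _ (by omega) (by omega) (by omega) (by omega)
      (by exact_mod_cast hile)
  simp only [hbs]
  have hps : (PySem.List.pyGet? (0 :: psSpec 0 target) ((TW target m).length : Int)).getD 0
      = (target.take (TW target m).length).sum := by
    rw [PySem.List.pyGet?_of_nonneg _ (by omega)]
    rw [show (((TW target m).length : Int)).toNat = (TW target m).length from by omega]
    rw [← List.getD_eq_getElem?_getD]
    exact prefsum_getD target _ hile
  rw [hps]
  have htake : target.take (TW target m).length = TW target m :=
    (List.prefix_iff_eq_take.mp (List.takeWhile_prefix _)).symm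
  rw [goA_eq m target key, htake]
  have hi0 : ((((TW target m).length : Int)) == 0) = decide (TW target m = []) := by
    rcases eq_or_ne (TW target m) [] with h | h
    · simp [h]
    · have hlen : (TW target m).length ≠ 0 := by simpa using h
      simp [hlen, h]
  rw [hi0]
  simp

lemma loops_eq (target : List Int) (key : Int) :
    ∀ (d : Nat) (s e : Int), (e - s).toNat ≤ d →
      loopA target key s e
        = loopB (runmaxSpec target) (0 :: psSpec 0 target) (target.length : Int) key s e := by
  intro d
  induction d with
  | zero =>
    intro s e hd
    rw [loopA, loopB]
    have hnlt : ¬ s < e := by omega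
    rw [if_neg hnlt, if_neg hnlt]
  | succ d ih =>
    intro s e hd
    rw [loopA, loopB]
    by_cases hlt : s < e
    · have hmid : PySem.Int.floordiv (s + e) 2 = (s + e) / 2 :=
        PySem.Int.floordiv_eq_ediv_of_pos (by omega)
      simp only [if_pos hlt, hmid]
      rw [feasible_eq target key ((s + e) / 2 + 1)]
      by_cases hf : get_dest_level target ((s + e) / 2 + 1) key = true
      · rw [if_pos hf, if_pos hf]
        exact ih _ e (by omega)
      · rw [if_neg hf, if_neg hf]
        exact ih s _ (by omega)
    · rw [if_neg hlt, if_neg hlt]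

-- ===== VERDICT (by name: the statement is the Claim_ definition above) =====
theorem solution_spec : Claim_equal_solution := by
  intro target key _ _
  unfold Spec_solution solution solution_alt
  rw [buildRunmax_eq, buildPrefsum_eq]
  exact loops_eq target key _ _ _ (le_refl _)
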